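-- pv_equiv track=rewrite | github.com/Rayan-ouer/AZ-chat-bot | app/model.py | truncate_text_blocks
-- ===== SOURCE A (Python) =====
-- def truncate_text_blocks(blocks: list[str], max_chars: int, separator: str, show_summary: bool) -> str:
--     final_chunks = []
--     current_size = 0
--
--     for chunk in blocks:
--         chunk_size = len(chunk) + len(separator)
--         if current_size + chunk_size > max_chars:
--             break
--         final_chunks.append(chunk)
--         current_size += chunk_size
--
--     result = separator.join(final_chunks)
--     if show_summary and len(final_chunks) < len(blocks):
--         result += f"\n...({len(blocks) - len(final_chunks)} blocs tronqués)"
--     return result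
-- ===== SOURCE B (Python) =====
-- def _prefix_sums(sizes):
--     out = []
--     t = 0
--     for s in sizes:
--         t += s
--         out.append(t)
--     return out
--
--
-- def _bisect_right(a, x):
--     # rightmost insertion point in a nondecreasing list (hand-written bisect)
--     lo, hi = 0, len(a)
--     while lo < hi:
--         mid = (lo + hi) // 2
--         if x < a[mid]:
--             hi = mid
--         else:
--             lo = mid + 1
--     return lo
--
--
-- def _summary(total, kept):
--     return f"\n...({total - kept} blocs tronqués)" if kept < total else ""
--
--
-- def truncate_text_blocks(blocks: list[str], max_chars: int, separator: str, show_summary: bool) -> str: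
--     # Prefix sums are nondecreasing (sizes >= 0), so binary search for the
--     # rightmost prefix <= max_chars gives exactly A's break point.
--     prefix = _prefix_sums([len(c) + len(separator) for c in blocks])
--     k = _bisect_right(prefix, max_chars)
--     out = separator.join(blocks[:k])
--     return out + (_summary(len(blocks), k) if show_summary else "")
-- ===== Notes on version B (the rewrite author's own statement) =====
-- stated objective: alternative
-- what changed: Replaced A's mutable accumulate-and-break loop collecting chunks by staged passes: build the prefix-sum list of block sizes, locate the cutoff k by a hand-written binary search (bisect_right, valid since prefix sums are nondecreasing), then slice blocks[:k], join, and append a summary suffix built by a helper.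
import Mathlib
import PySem

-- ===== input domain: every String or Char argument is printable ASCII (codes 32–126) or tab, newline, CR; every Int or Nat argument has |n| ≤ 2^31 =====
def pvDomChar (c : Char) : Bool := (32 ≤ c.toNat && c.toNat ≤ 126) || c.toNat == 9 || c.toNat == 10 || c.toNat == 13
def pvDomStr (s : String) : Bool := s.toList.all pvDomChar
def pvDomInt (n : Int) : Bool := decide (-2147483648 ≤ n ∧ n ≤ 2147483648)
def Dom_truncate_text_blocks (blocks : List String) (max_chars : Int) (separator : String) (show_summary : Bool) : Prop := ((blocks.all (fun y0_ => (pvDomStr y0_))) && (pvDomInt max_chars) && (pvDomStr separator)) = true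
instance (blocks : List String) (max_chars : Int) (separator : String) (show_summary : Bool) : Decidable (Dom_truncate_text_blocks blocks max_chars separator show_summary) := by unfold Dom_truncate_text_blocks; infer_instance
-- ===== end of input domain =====

-- B replaces A's accumulate-and-break loop by staged passes: prefix sums, a hand-written
-- binary search for the cutoff, then slice/join; same cost, different algorithm (objective: alternative).

-- ===== PORT A =====
-- A's loop: carry current_size, stop (return []) at the first chunk that would overflow.
def pvALoop (sepLen : Int) (max_chars : Int) : List String → Int → List String
  | [], _ => []
  | chunk :: rest, cur =>
    let chunk_size : Int := PySem.Str.len chunk + sepLen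
    if cur + chunk_size > max_chars then []
    else chunk :: pvALoop sepLen max_chars rest (cur + chunk_size)

def truncate_text_blocks (blocks : List String) (max_chars : Int) (separator : String) (show_summary : Bool) : String :=
  let final_chunks := pvALoop (PySem.Str.len separator) max_chars blocks 0
  let result := PySem.Str.join separator final_chunks
  if show_summary && decide (final_chunks.length < blocks.length) then
    result ++ "\n...(" ++ PySem.Int.toStr ((blocks.length : Int) - (final_chunks.length : Int)) ++ " blocs tronqués)"
  else result

-- ===== PORT B =====
-- Source B's _prefix_sums: running total, list of cumulative sums.
def pvPrefixSums : List Int → Int → List Int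
  | [], _ => []
  | s :: rest, t => (t + s) :: pvPrefixSums rest (t + s)

-- Source B's _bisect_right: binary search; a[mid] read with getD (mid is always in range: lo < hi ≤ len a).
def pvBisectRight (a : List Int) (x : Int) (lo hi : Nat) : Nat :=
  if _h : lo < hi then
    let mid := (lo + hi) / 2
    if x < a.getD mid 0 then pvBisectRight a x lo mid
    else pvBisectRight a x (mid + 1) hi
  else lo
termination_by hi - lo
decreasing_by all_goals omega

-- Source B's _summary helper.
def pvSummary (total kept : Nat) : String :=
  if kept < total then "\n...(" ++ PySem.Int.toStr ((total : Int) - (kept : Int)) ++ " blocs tronqués)" else ""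

def truncate_text_blocks_alt (blocks : List String) (max_chars : Int) (separator : String) (show_summary : Bool) : String :=
  let prefs := pvPrefixSums (blocks.map (fun c => PySem.Str.len c + PySem.Str.len separator)) 0
  let k := pvBisectRight prefs max_chars 0 prefs.length
  let out := PySem.Str.join separator (blocks.take k)
  out ++ (if show_summary then pvSummary blocks.length k else "")

-- ===== PRECONDITION & SPEC =====
def Spec_truncate_text_blocks (blocks : List String) (max_chars : Int) (separator : String) (show_summary : Bool) (out : String) : Prop := out = truncate_text_blocks_alt blocks max_chars separator show_summary
instance (blocks : List String) (max_chars : Int) (separator : String) (show_summary : Bool) (out : String) : Decidable (Spec_truncate_text_blocks blocks max_chars separator show_summary out) := by unfold Spec_truncate_text_blocks; infer_instance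

-- ===== CLAIM (what is proved, stated in full; the proofs are below) =====
def Claim_equal_truncate_text_blocks : Prop := ∀ (blocks : List String) (max_chars : Int) (separator : String) (show_summary : Bool), Dom_truncate_text_blocks blocks max_chars separator show_summary → Spec_truncate_text_blocks blocks max_chars separator show_summary (truncate_text_blocks blocks max_chars separator show_summary)

-- ===== LEMMAS AND PROOFS =====

theorem pvPrefixSums_length (sizes : List Int) (t : Int) :
    (pvPrefixSums sizes t).length = sizes.length := by
  induction sizes generalizing t with
  | nil => simp [pvPrefixSums]
  | cons s rest ih => simp [pvPrefixSums, ih]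

-- every entry of the prefix list is at least the starting total when sizes are nonnegative
theorem pvPrefixSums_ge (sizes : List Int) (hnn : ∀ s ∈ sizes, 0 ≤ s) :
    ∀ (t p : Int), p ∈ pvPrefixSums sizes t → t ≤ p := by
  induction sizes with
  | nil => intro t p hp; simp [pvPrefixSums] at hp
  | cons s rest ih =>
    intro t p hp
    simp only [pvPrefixSums, List.mem_cons] at hp
    have hs : 0 ≤ s := hnn s (by simp)
    rcases hp with h | h
    · omega
    · have := ih (fun u hu => hnn u (by simp [hu])) _ _ h; omega

-- characterization: for a prefix-sum list of nonnegative sizes, entry i is ≤ x iff i < countP (≤ x)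
theorem pvPrefixSums_char (sizes : List Int) (hnn : ∀ s ∈ sizes, 0 ≤ s) :
    ∀ (t x : Int) (i : Nat), i < (pvPrefixSums sizes t).length →
      ((pvPrefixSums sizes t).getD i 0 ≤ x ↔ i < (pvPrefixSums sizes t).countP (fun p => decide (p ≤ x))) := by
  induction sizes with
  | nil => intro t x i hi; simp [pvPrefixSums] at hi
  | cons s rest ih =>
    intro t x i hi
    have hrest : ∀ u ∈ rest, 0 ≤ u := fun u hu => hnn u (by simp [hu])
    simp only [pvPrefixSums] at hi ⊢
    by_cases hs : t + s ≤ x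
    · rw [List.countP_cons_of_pos (pa := by simpa using hs)]
      cases i with
      | zero => simpa using hs
      | succ j =>
        have hj : j < (pvPrefixSums rest (t + s)).length := by
          simpa using hi
        have := ih hrest (t + s) x j hj
        simpa [Nat.succ_lt_succ_iff] using this
    · have hzero : (pvPrefixSums rest (t + s)).countP (fun p => decide (p ≤ x)) = 0 := by
        rw [List.countP_eq_zero]
        intro p hp
        have := pvPrefixSums_ge rest hrest (t + s) p hp
        simp only [decide_eq_true_eq]; omega
      rw [List.countP_cons_of_neg (pa := by simpa using hs), hzero]
      simp only [Nat.not_lt_zero, iff_false, not_le]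
      cases i with
      | zero => simpa using by omega
      | succ j =>
        have hj : j < (pvPrefixSums rest (t + s)).length := by simpa using hi
        have hmem : (pvPrefixSums rest (t + s)).getD j 0 ∈ pvPrefixSums rest (t + s) := by
          rw [List.getD_eq_getElem _ _ hj]; exact List.getElem_mem hj
        have := pvPrefixSums_ge rest hrest (t + s) _ hmem
        simp only [List.getD_cons_succ]
        omega

-- binary-search correctness against the characterization
theorem pvBisectRight_eq (a : List Int) (x : Int) (c : Nat)
    (hchar : ∀ i, i < a.length → (a.getD i 0 ≤ x ↔ i < c)) :
    ∀ (lo hi : Nat), hi ≤ a.length → lo ≤ c → c ≤ hi → pvBisectRight a x lo hi = c := by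
  intro lo hi
  induction lo, hi using pvBisectRight.induct a x with
  | case1 lo hi h mid h2 ih =>
    intro hha hlo hhi
    have hmid : mid < a.length := by omega
    have := hchar mid hmid
    rw [pvBisectRight]
    simp only [dif_pos h]
    rw [if_pos (by simpa using h2)]
    exact ih (by omega) hlo (by omega)
  | case2 lo hi h mid h2 ih =>
    intro hha hlo hhi
    have hmid : mid < a.length := by omega
    have := hchar mid hmid
    have hle : a.getD mid 0 ≤ x := by omega
    rw [pvBisectRight]
    simp only [dif_pos h]
    rw [if_neg (by simpa using h2)]
    exact ih hha (by omega) hhi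
  | case3 lo hi h =>
    intro hha hlo hhi
    rw [pvBisectRight]
    simp only [dif_neg h]
    omega

-- A's loop result is the take of the count of fitting prefixes
theorem pvALoop_eq_take (sep : String) (M : Int) :
    ∀ (bl : List String) (t : Int),
      pvALoop (PySem.Str.len sep) M bl t
        = bl.take ((pvPrefixSums (bl.map (fun c => PySem.Str.len c + PySem.Str.len sep)) t).countP
            (fun p => decide (p ≤ M))) := by
  have hsep : 0 ≤ PySem.Str.len sep := by rw [PySem.Str.len_eq]; positivity
  intro bl
  induction bl with
  | nil => intro t; simp [pvALoop, pvPrefixSums]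
  | cons c rest ih =>
    intro t
    have hnn : ∀ s ∈ rest.map (fun c => PySem.Str.len c + PySem.Str.len sep), 0 ≤ s := by
      intro s hs
      rcases List.mem_map.mp hs with ⟨u, _, rfl⟩
      have : 0 ≤ PySem.Str.len u := by rw [PySem.Str.len_eq]; positivity
      omega
    simp only [pvALoop, List.map_cons, pvPrefixSums]
    have harr : t + (PySem.Str.len c + PySem.Str.len sep) = t + PySem.Str.len c + PySem.Str.len sep := by ring
    by_cases h : t + (PySem.Str.len c + PySem.Str.len sep) > M
    · rw [if_pos h, List.countP_eq_zero.mpr, List.take_zero]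
      intro p hp
      rcases List.mem_cons.mp hp with rfl | hp
      · simp only [decide_eq_true_eq]; omega
      · have := pvPrefixSums_ge _ hnn _ p hp
        simp only [decide_eq_true_eq]; omega
    · rw [if_neg h, List.countP_cons_of_pos (pa := by simp only [decide_eq_true_eq]; omega),
          List.take_succ_cons, ih]

-- ===== VERDICT (by name: the statement is the Claim_ definition above) =====
theorem truncate_text_blocks_spec : Claim_equal_truncate_text_blocks := by
  intro blocks max_chars separator show_summary _
  unfold Spec_truncate_text_blocks truncate_text_blocks truncate_text_blocks_alt
  have hnn : ∀ s ∈ blocks.map (fun c => PySem.Str.len c + PySem.Str.len separator), 0 ≤ s := by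
    intro s hs
    rcases List.mem_map.mp hs with ⟨u, _, rfl⟩
    have h1 : 0 ≤ PySem.Str.len u := by rw [PySem.Str.len_eq]; positivity
    have h2 : 0 ≤ PySem.Str.len separator := by rw [PySem.Str.len_eq]; positivity
    omega
  set sizes := blocks.map (fun c => PySem.Str.len c + PySem.Str.len separator) with hsizes
  set prefs := pvPrefixSums sizes 0 with hprefs
  set c := prefs.countP (fun p => decide (p ≤ max_chars)) with hc
  have hplen : prefs.length = blocks.length := by
    rw [hprefs, pvPrefixSums_length, hsizes, List.length_map]
  have hcle : c ≤ blocks.length := by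
    have := List.countP_le_length (l := prefs) (p := fun p => decide (p ≤ max_chars))
    omega
  have hk : pvBisectRight prefs max_chars 0 prefs.length = c := by
    apply pvBisectRight_eq prefs max_chars c
      (fun i hi => pvPrefixSums_char sizes hnn 0 max_chars i (by omega)) 0 prefs.length
      le_rfl (by omega) (by omega)
  have hloop : pvALoop (PySem.Str.len separator) max_chars blocks 0 = blocks.take c :=
    pvALoop_eq_take separator max_chars blocks 0
  have htlen : (blocks.take c).length = c := by rw [List.length_take]; omega
  simp only [hloop, hk]
  simp only [htlen]
  by_cases hss : show_summary = true
  · subst hss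
    simp only [Bool.true_and, if_true]
    unfold pvSummary
    by_cases hlt : c < blocks.length
    · rw [if_pos (by simpa using hlt), if_pos hlt]
      simp [String.append_assoc]
    · rw [if_neg (by simpa using hlt), if_neg hlt]
      simp
  · have : show_summary = false := by simpa using hss
    subst this
    simp
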